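-- pv_equiv track=rewrite | github.com/alliance-genome/agr_ai_curation | scripts/create_tool.py | _split_respecting_brackets
-- ===== SOURCE A (Python) =====
-- from typing import List, Optional, Tuple
--
-- def _split_respecting_brackets(s: str, delimiter: str = ",") -> List[str]:
--     """Split string by delimiter, respecting brackets.
--
--     Handles commas inside brackets like Dict[str, Any].
--     """
--     result = []
--     current = []
--     bracket_depth = 0
--
--     for char in s:
--         if char == "[":
--             bracket_depth += 1
--             current.append(char)
--         elif char == "]":
--             bracket_depth -= 1
--             current.append(char)
--         elif char == delimiter and bracket_depth == 0:
--             result.append("".join(current))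
--             current = []
--         else:
--             current.append(char)
--
--     # Don't forget the last segment
--     if current:
--         result.append("".join(current))
--
--     return result
-- ===== SOURCE B (Python) =====
-- from typing import List
--
-- def _split_respecting_brackets(s: str, delimiter: str = ",") -> List[str]:
--     """Split string by delimiter, respecting brackets: two-phase version.
--
--     First pass records the indices of splitting delimiters (depth 0);
--     second phase slices the string at those indices.
--     """
--     depth = 0
--     cuts = []
--     for i, ch in enumerate(s):
--         if ch == "[":
--             depth += 1
--         elif ch == "]":
--             depth -= 1
--         elif ch == delimiter and depth == 0:
--             cuts.append(i)
--     segs = []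
--     prev = 0
--     for i in cuts:
--         segs.append(s[prev:i])
--         prev = i + 1
--     tail = s[prev:]
--     if tail:
--         segs.append(tail)
--     return segs
-- ===== Notes on version B (the rewrite author's own statement) =====
-- stated objective: alternative
-- what changed: A accumulates each segment character by character in a growing buffer and joins it; B first records the indices of the depth-0 delimiter occurrences in one pass and then produces the segments by slicing the string between consecutive cut indices.
import Mathlib
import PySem

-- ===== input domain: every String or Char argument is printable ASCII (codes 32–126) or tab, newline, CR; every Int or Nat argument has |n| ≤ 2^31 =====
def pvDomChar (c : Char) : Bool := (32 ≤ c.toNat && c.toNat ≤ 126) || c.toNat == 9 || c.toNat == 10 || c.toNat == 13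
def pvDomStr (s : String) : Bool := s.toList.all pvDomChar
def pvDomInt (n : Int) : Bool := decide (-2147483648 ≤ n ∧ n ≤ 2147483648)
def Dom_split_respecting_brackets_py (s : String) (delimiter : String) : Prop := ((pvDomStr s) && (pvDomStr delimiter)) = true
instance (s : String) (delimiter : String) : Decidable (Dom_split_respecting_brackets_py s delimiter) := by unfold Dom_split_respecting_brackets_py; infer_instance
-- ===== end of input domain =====

-- B replaces A's per-character segment buffer by a cut-index pass followed by slicing; objective: alternative (same cost).

-- ===== PORT A =====
-- loop body of A's for-char loop over state (result, current, bracket_depth)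
def pvAStep (delimiter : String) (acc : List String × List Char × Int) (c : Char) :
    List String × List Char × Int :=
  if c = '[' then (acc.1, acc.2.1 ++ [c], acc.2.2 + 1)
  else if c = ']' then (acc.1, acc.2.1 ++ [c], acc.2.2 - 1)
  else if String.mk [c] = delimiter ∧ acc.2.2 = 0 then (acc.1 ++ [String.mk acc.2.1], [], acc.2.2)
  else (acc.1, acc.2.1 ++ [c], acc.2.2)

def split_respecting_brackets_py (s : String) (delimiter : String) : List String :=
  let st := s.toList.foldl (pvAStep delimiter) ([], [], 0)
  if st.2.1 ≠ [] then st.1 ++ [String.mk st.2.1] else st.1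

-- ===== PORT B =====
-- first pass of B: over enumerate(s), state (bracket depth, cut indices)
def pvBStep1 (delimiter : String) (acc : Int × List Int) (p : Int × Char) : Int × List Int :=
  if p.2 = '[' then (acc.1 + 1, acc.2)
  else if p.2 = ']' then (acc.1 - 1, acc.2)
  else if String.mk [p.2] = delimiter ∧ acc.1 = 0 then (acc.1, acc.2 ++ [p.1])
  else acc

-- second pass of B: over the cut indices, state (segments, prev)
def pvBStep2 (cs : List Char) (acc : List String × Int) (i : Int) : List String × Int :=
  (acc.1 ++ [String.mk (PySem.List.slice cs (some acc.2) (some i))], i + 1)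

def split_respecting_brackets_py_alt (s : String) (delimiter : String) : List String :=
  let cs := s.toList
  let fst := (PySem.List.enumerate cs).foldl (pvBStep1 delimiter) (0, [])
  let snd := fst.2.foldl (pvBStep2 cs) ([], 0)
  let tail := PySem.List.slice cs (some snd.2) none
  if tail ≠ [] then snd.1 ++ [String.mk tail] else snd.1

-- ===== PRECONDITION & SPEC =====
def Spec_split_respecting_brackets_py (s : String) (delimiter : String) (out : List String) : Prop := out = split_respecting_brackets_py_alt s delimiter
instance (s : String) (delimiter : String) (out : List String) : Decidable (Spec_split_respecting_brackets_py s delimiter out) := by unfold Spec_split_respecting_brackets_py; infer_instance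

-- ===== CLAIM (what is proved, stated in full; the proofs are below) =====
def Claim_equal_split_respecting_brackets_py : Prop := ∀ (s : String) (delimiter : String), Dom_split_respecting_brackets_py s delimiter → Spec_split_respecting_brackets_py s delimiter (split_respecting_brackets_py s delimiter)

-- ===== LEMMAS AND PROOFS =====

-- finalizers of the two ports, named for the proofs
def pvAFin (st : List String × List Char × Int) : List String :=
  if st.2.1 ≠ [] then st.1 ++ [String.mk st.2.1] else st.1

def pvBFin (full : List Char) (snd : List String × Int) : List String :=
  let tail := PySem.List.slice full (some snd.2) none
  if tail ≠ [] then snd.1 ++ [String.mk tail] else snd.1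

-- reference splitter both ports are reduced to
def pvRef (delim : String) : List Char → Int → List Char → List (List Char)
  | [], _, cur => if cur = [] then [] else [cur]
  | c :: rest, d, cur =>
    if c = '[' then pvRef delim rest (d + 1) (cur ++ [c])
    else if c = ']' then pvRef delim rest (d - 1) (cur ++ [c])
    else if String.mk [c] = delim ∧ d = 0 then cur :: pvRef delim rest d []
    else pvRef delim rest d (cur ++ [c])

-- recursive form of B's first pass: cut indices from position n at depth d
def pvCollect (delim : String) : List Char → Nat → Int → List Int
  | [], _, _ => []
  | c :: rest, n, d =>
    if c = '[' then pvCollect delim rest (n + 1) (d + 1)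
    else if c = ']' then pvCollect delim rest (n + 1) (d - 1)
    else if String.mk [c] = delim ∧ d = 0 then (n : Int) :: pvCollect delim rest (n + 1) d
    else pvCollect delim rest (n + 1) d

lemma pvA_loop (delim : String) (cs : List Char) : ∀ (res : List String) (cur : List Char) (d : Int),
    pvAFin (cs.foldl (pvAStep delim) (res, cur, d))
      = res ++ (pvRef delim cs d cur).map String.mk := by
  induction cs with
  | nil =>
      intro res cur d
      simp only [List.foldl_nil, pvRef, pvAFin]
      by_cases h : cur = [] <;> simp [h]
  | cons c rest ih =>
      intro res cur d
      simp only [List.foldl_cons, pvRef, pvAStep]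
      split_ifs with h1 h2 h3 <;> simp [ih, List.append_assoc]

lemma pvB_collect (delim : String) (cs : List Char) : ∀ (n : Nat) (d : Int) (cuts : List Int),
    ((PySem.List.enumerate cs (n : Int)).foldl (pvBStep1 delim) (d, cuts)).2
      = cuts ++ pvCollect delim cs n d := by
  induction cs with
  | nil => intro n d cuts; simp [PySem.List.enumerate_nil, pvCollect]
  | cons c rest ih =>
      intro n d cuts
      rw [PySem.List.enumerate_cons]
      have hcastn : ((n : Int) + 1) = ((n + 1 : Nat) : Int) := by push_cast; ring
      simp only [List.foldl_cons, pvBStep1, pvCollect]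
      split_ifs with h1 h2 h3 <;> rw [hcastn, ih] <;> simp

lemma pvTake_succ_of_drop {full rest : List Char} {c : Char} {n prev : Nat}
    (hcs : full.drop n = c :: rest) (hpn : prev ≤ n) :
    (full.drop prev).take (n + 1 - prev) = (full.drop prev).take (n - prev) ++ [c] := by
  have hget : full[n]? = some c := by
    rw [← Nat.add_zero n, ← List.getElem?_drop, hcs]; rfl
  have hget2 : (full.drop prev)[n - prev]? = some c := by
    rw [List.getElem?_drop, Nat.add_sub_cancel' hpn]; exact hget
  have : n + 1 - prev = (n - prev) + 1 := by omega
  rw [this, List.take_succ, hget2]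
  simp

lemma pvB_slices (delim : String) (full : List Char) (cs : List Char) :
    ∀ (n prev : Nat) (d : Int) (acc : List String),
    full.drop n = cs → prev ≤ n →
    pvBFin full ((pvCollect delim cs n d).foldl (pvBStep2 full) (acc, (prev : Int)))
      = acc ++ (pvRef delim cs d ((full.drop prev).take (n - prev))).map String.mk := by
  induction cs with
  | nil =>
      intro n prev d acc hcs hpn
      have hnl : full.length ≤ n := by
        have := congrArg List.length hcs
        simp at this; omega
      have htail : PySem.List.slice full (some (prev : Int)) none = full.drop prev :=
        PySem.List.slice_from_natCast full prev
      have hcur : (full.drop prev).take (n - prev) = full.drop prev := by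
        apply List.take_of_length_le
        simp; omega
      simp only [pvCollect, List.foldl_nil, pvRef, pvBFin, htail, hcur]
      by_cases h : full.drop prev = [] <;> simp [h]
  | cons c rest ih =>
      intro n prev d acc hcs hpn
      have hrest : full.drop (n + 1) = rest := by
        have h1 : full.drop (n + 1) = (full.drop n).drop 1 := by
          rw [List.drop_drop]
        simp [h1, hcs]
      have hstep := pvTake_succ_of_drop hcs hpn
      simp only [pvCollect, pvRef]
      split_ifs with h1 h2 h3
      · rw [ih (n + 1) prev (d + 1) acc hrest (by omega), hstep]
      · rw [ih (n + 1) prev (d - 1) acc hrest (by omega), hstep]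
      · -- cut branch: emit the slice [prev, n), restart at n + 1
        simp only [List.foldl_cons, pvBStep2]
        have hsl : PySem.List.slice full (some (prev : Int)) (some (n : Int))
            = (full.drop prev).take (n - prev) := PySem.List.slice_natCast full prev n
        have hcast : ((n : Int) + 1) = ((n + 1 : Nat) : Int) := by push_cast; ring
        rw [hsl, hcast,
          ih (n + 1) (n + 1) d (acc ++ [String.mk ((full.drop prev).take (n - prev))]) hrest
            (le_refl _)]
        simp
      · rw [ih (n + 1) prev d acc hrest (by omega), hstep]

-- ===== VERDICT (by name: the statement is the Claim_ definition above) =====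
theorem split_respecting_brackets_py_spec : Claim_equal_split_respecting_brackets_py := by
  intro s delimiter _
  unfold Spec_split_respecting_brackets_py
  have hA : split_respecting_brackets_py s delimiter
      = pvAFin (s.toList.foldl (pvAStep delimiter) ([], [], 0)) := rfl
  have hcoll := pvB_collect delimiter s.toList 0 0 []
  simp only [Nat.cast_zero, List.nil_append] at hcoll
  have hB : split_respecting_brackets_py_alt s delimiter
      = pvBFin s.toList
          (((PySem.List.enumerate s.toList 0).foldl (pvBStep1 delimiter) (0, [])).2.foldl
            (pvBStep2 s.toList) ([], 0)) := rfl
  rw [hA, hB, hcoll, pvA_loop]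
  have := pvB_slices delimiter s.toList s.toList 0 0 0 [] (by simp) (le_refl 0)
  simp only [Nat.sub_self, List.take_zero, List.drop_zero, Nat.cast_zero, List.nil_append] at this
  rw [this]
  simp
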